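-- pv_equiv track=rewrite | github.com/ignacioeltit/proyecto01junio | src/obd/pids_ext.py | parse_calibration_id
-- ===== SOURCE A (Python) =====
-- def parse_calibration_id(resp):
--     """Parsea Calibration ID para Toyota Hilux 2018"""
--     if not resp:
--         return None
--     try:
--         raw = resp.replace(" ", "")
--         if raw.startswith("4904"):
--             data_bytes = raw[4:]
--             cal_id = ""
--             for i in range(0, len(data_bytes), 2):
--                 byte_val = int(data_bytes[i:i+2], 16)
--                 if 32 <= byte_val <= 126:
--                     cal_id += chr(byte_val)
--             return cal_id
--     except Exception:
--         return None
-- ===== SOURCE B (Python) =====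
-- def parse_calibration_id(resp):
--     """Parsea Calibration ID para Toyota Hilux 2018"""
--     if not resp:
--         return None
--     raw = resp.replace(" ", "")
--     if not raw.startswith("4904"):
--         return None
--     data = raw[4:]
--     data = data[:len(data) // 2 * 2]  # a trailing half-byte decodes below 16, never printable
--     try:
--         decoded = bytes.fromhex(data)
--     except ValueError:
--         return None
--     return "".join(chr(b) for b in decoded if 32 <= b <= 126)
-- ===== Notes on version B (the rewrite author's own statement) =====
-- stated objective: idiomatic
-- what changed: B replaces A's index-stepped loop that parses each 2-char slice with int(·,16) and appends char by char, by truncating the payload to whole bytes, bulk-decoding it with bytes.fromhex, and joining the printable bytes with a single generator-join.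
-- outside the precondition, e.g. on parse_calibration_id('4904+41'): A returns '', B returns None; on parse_calibration_id('490441\t\t42'): A returns None, B returns 'AB'
import Mathlib
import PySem

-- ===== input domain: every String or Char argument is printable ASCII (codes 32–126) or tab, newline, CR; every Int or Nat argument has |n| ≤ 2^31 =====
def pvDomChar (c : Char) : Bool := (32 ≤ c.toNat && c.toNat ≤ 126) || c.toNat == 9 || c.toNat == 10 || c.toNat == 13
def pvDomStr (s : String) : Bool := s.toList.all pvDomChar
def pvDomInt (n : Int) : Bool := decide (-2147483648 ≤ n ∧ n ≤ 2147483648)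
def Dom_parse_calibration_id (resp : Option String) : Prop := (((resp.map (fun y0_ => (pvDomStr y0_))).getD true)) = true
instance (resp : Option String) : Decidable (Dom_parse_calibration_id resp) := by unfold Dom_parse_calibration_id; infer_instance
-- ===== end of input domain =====

-- B decodes the hex payload in bulk (bytes.fromhex, truncated to whole bytes) and
-- joins the printable bytes, instead of A's per-index slice loop through int(·,16);
-- objective: idiomatic.


-- shared char-class helpers (used by both ports)
-- hex digit value of a char (none if not a hex digit)
def pvHexVal (c : Char) : Option Nat :=
  if 48 ≤ c.toNat ∧ c.toNat ≤ 57 then some (c.toNat - 48)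
  else if 97 ≤ c.toNat ∧ c.toNat ≤ 102 then some (c.toNat - 87)
  else if 65 ≤ c.toNat ∧ c.toNat ≤ 70 then some (c.toNat - 55)
  else none

-- Python whitespace characters (the ASCII ones)
def pvWs (c : Char) : Bool :=
  c.toNat == 32 || c.toNat == 9 || c.toNat == 10 || c.toNat == 13 || c.toNat == 11 || c.toNat == 12

-- ===== PORT A =====
-- int(s, 16): strip whitespace, optional sign, optional 0x/0X prefix, hex digits
-- with single '_' separators; none = ValueError (exact on ASCII input)
def pvDigitsRest? : List Char → Nat → Option Nat
  | [], acc => some acc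
  | c :: rest, acc =>
    if c = '_' then
      match rest with
      | [] => none
      | d :: r2 => (pvHexVal d).bind fun v => pvDigitsRest? r2 (acc * 16 + v)
    else
      (pvHexVal c).bind fun v => pvDigitsRest? rest (acc * 16 + v)

def pvDigits? : List Char → Option Nat
  | [] => none
  | c :: rest => (pvHexVal c).bind fun v => pvDigitsRest? rest v

def pyIntBase16? (s : List Char) : Option Int :=
  let l := ((s.dropWhile pvWs).reverse.dropWhile pvWs).reverse
  let p := if l.head? = some '+' then ((1 : Int), l.tail)
           else if l.head? = some '-' then ((-1 : Int), l.tail)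
           else ((1 : Int), l)
  let l2 := if p.2.take 2 = ['0', 'x'] ∨ p.2.take 2 = ['0', 'X'] then p.2.drop 2 else p.2
  (pvDigits? l2).map (fun n => p.1 * (n : Int))

-- for i in range(0, len(data_bytes), 2): one step per index, the chunk is the next
-- (up to) two chars = data_bytes[i:i+2]; none = the exception caught by A's except
def pvLoopA : List Char → List Char → Option (List Char)
  | [], cal => some cal
  | [a], cal =>  -- last iteration: a one-char chunk, then the loop ends
    match pyIntBase16? [a] with
    | none => none
    | some v => some (if 32 ≤ v ∧ v ≤ 126 then cal ++ [Char.ofNat v.toNat] else cal)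
  | a :: b :: rest, cal =>
    match pyIntBase16? [a, b] with
    | none => none
    | some v => pvLoopA rest (if 32 ≤ v ∧ v ≤ 126 then cal ++ [Char.ofNat v.toNat] else cal)

def parse_calibration_id (resp : Option String) : Option String :=
  match resp with
  | none => none
  | some s =>
    if s.toList = [] then none  -- `if not resp`
    else
      let raw := s.toList.filter (fun c => !(c == ' '))  -- resp.replace(" ", "")
      if raw.take 4 = ['4', '9', '0', '4'] then  -- raw.startswith("4904")
        match pvLoopA (raw.drop 4) [] with
        | none => none  -- except Exception: return None
        | some cal => some (String.ofList cal)
      else none  -- falls off the function: return None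

-- ===== PORT B =====
-- bytes.fromhex (CPython 3.11): whitespace skipped between byte pairs, a pair is
-- two hex digits; none = ValueError (exact on ASCII input)
def pvFromhex? : List Char → Option (List Nat)
  | [] => some []
  | c :: rest =>
    if pvWs c then pvFromhex? rest
    else
      match rest with
      | [] => none
      | b :: r2 =>
        (pvHexVal c).bind fun x =>
          (pvHexVal b).bind fun y =>
            (pvFromhex? r2).map fun t => (16 * x + y) :: t

def parse_calibration_id_alt (resp : Option String) : Option String :=
  match resp with
  | none => none
  | some s =>
    if s.toList = [] then none
    else
      let raw := s.toList.filter (fun c => !(c == ' '))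
      if raw.take 4 = ['4', '9', '0', '4'] then
        let data := raw.drop 4
        let data2 := data.take (data.length / 2 * 2)  -- drop trailing half-byte
        match pvFromhex? data2 with
        | none => none
        | some bs =>
          some (String.ofList
            ((bs.filter (fun b => 32 ≤ b ∧ b ≤ 126)).map (fun b => Char.ofNat b)))
      else none

-- ===== PRECONDITION & SPEC =====
-- hex-digit test, used only by Pre_ and the proofs
def pvIsHex (c : Char) : Bool :=
  (48 ≤ c.toNat && c.toNat ≤ 57) || (97 ≤ c.toNat && c.toNat ≤ 102) || (65 ≤ c.toNat && c.toNat ≤ 70)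

-- Pre_ excludes responses whose space-stripped payload after "4904" contains a
-- non-hex-digit character: there A's chunk-wise int(·,16) leniency (signs, tabs)
-- and B's bulk fromhex disagree and neither partial decode is a specified value.
def Pre_parse_calibration_id (resp : Option String) : Prop :=
  (match resp with
   | none => true
   | some s =>
     let raw := s.toList.filter (fun c => !(c == ' '))
     !(decide (raw.take 4 = ['4', '9', '0', '4'])) || (raw.drop 4).all pvIsHex) = true
instance (resp : Option String) : Decidable (Pre_parse_calibration_id resp) := by
  unfold Pre_parse_calibration_id; infer_instance

def pvWitness_parse_calibration_id : Option String := some "4904 41 42"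

def Spec_parse_calibration_id (resp : Option String) (out : Option String) : Prop := out = parse_calibration_id_alt resp
instance (resp : Option String) (out : Option String) : Decidable (Spec_parse_calibration_id resp out) := by unfold Spec_parse_calibration_id; infer_instance

-- ===== CLAIM (what is proved, stated in full; the proofs are below) =====
def Claim_equal_parse_calibration_id : Prop := ∀ (resp : Option String), Dom_parse_calibration_id resp → Pre_parse_calibration_id resp → Spec_parse_calibration_id resp (parse_calibration_id resp)

-- ===== LEMMAS AND PROOFS =====

set_option maxRecDepth 4096


theorem pvLoopA_nil (cal : List Char) : pvLoopA [] cal = some cal := rfl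

theorem pvLoopA_one (a : Char) (cal : List Char) : pvLoopA [a] cal =
    match pyIntBase16? [a] with
    | none => none
    | some v => some (if 32 ≤ v ∧ v ≤ 126 then cal ++ [Char.ofNat v.toNat] else cal) := rfl

theorem pvLoopA_cons (a b : Char) (rest cal : List Char) : pvLoopA (a :: b :: rest) cal =
    match pyIntBase16? [a, b] with
    | none => none
    | some v => pvLoopA rest (if 32 ≤ v ∧ v ≤ 126 then cal ++ [Char.ofNat v.toNat] else cal) := rfl

theorem pvHexVal_of_isHex {c : Char} (h : pvIsHex c = true) :
    ∃ x, pvHexVal c = some x ∧ x ≤ 15 := by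
  simp only [pvIsHex, Bool.or_eq_true, Bool.and_eq_true, decide_eq_true_eq] at h
  simp only [pvHexVal]
  split_ifs with h1 h2 h3
  · exact ⟨_, rfl, by omega⟩
  · exact ⟨_, rfl, by omega⟩
  · exact ⟨_, rfl, by omega⟩
  · exfalso; omega

theorem pvWs_of_isHex {c : Char} (h : pvIsHex c = true) : pvWs c = false := by
  simp only [pvIsHex, Bool.or_eq_true, Bool.and_eq_true, decide_eq_true_eq] at h
  simp only [pvWs, Bool.or_eq_false_iff, beq_eq_false_iff_ne, ne_eq]
  omega

theorem pvNe_of_isHex {c d : Char} (h : pvIsHex c = true) (hd : pvIsHex d = false) :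
    c ≠ d := by
  intro he; rw [he, hd] at h; exact Bool.false_ne_true h

theorem pyIntBase16_one {a : Char} {x : Nat} (ha : pvIsHex a = true)
    (hva : pvHexVal a = some x) :
    pyIntBase16? [a] = some (x : Int) := by
  have hw := pvWs_of_isHex ha
  have hp : a ≠ '+' := pvNe_of_isHex ha (by decide)
  have hm : a ≠ '-' := pvNe_of_isHex ha (by decide)
  have h2 : ¬([a] = ['0', 'x'] ∨ [a] = ['0', 'X']) := by
    rintro (h | h) <;> simp_all
  simp only [pyIntBase16?, List.dropWhile_cons, hw, Bool.false_eq_true, if_false,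
    List.dropWhile_nil, List.reverse_cons, List.reverse_nil, List.nil_append,
    List.head?_cons, Option.some.injEq, hp, hm, List.tail_cons]
  rw [List.take_of_length_le (by simp), if_neg h2]
  simp [pvDigits?, hva, pvDigitsRest?]

theorem pyIntBase16_two {a b : Char} {x y : Nat} (ha : pvIsHex a = true)
    (hb : pvIsHex b = true) (hva : pvHexVal a = some x) (hvb : pvHexVal b = some y) :
    pyIntBase16? [a, b] = some ((16 * x + y : Nat) : Int) := by
  have hwa := pvWs_of_isHex ha
  have hwb := pvWs_of_isHex hb
  have hp : a ≠ '+' := pvNe_of_isHex ha (by decide)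
  have hm : a ≠ '-' := pvNe_of_isHex ha (by decide)
  have hus : b ≠ '_' := pvNe_of_isHex hb (by decide)
  have h0x : ¬([a, b] = ['0', 'x'] ∨ [a, b] = ['0', 'X']) := by
    have hx : b ≠ 'x' := pvNe_of_isHex hb (by decide)
    have hX : b ≠ 'X' := pvNe_of_isHex hb (by decide)
    rintro (h | h) <;> simp_all
  simp only [pyIntBase16?, List.dropWhile_cons, hwa, hwb, Bool.false_eq_true, if_false,
    List.dropWhile_nil, List.reverse_cons, List.reverse_nil, List.nil_append,
    List.cons_append, List.head?_cons, Option.some.injEq, hp, hm, List.tail_cons]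
  rw [List.take_of_length_le (by simp), if_neg h0x]
  have h3 : pvDigitsRest? [b] x = some (x * 16 + y) := by
    simp only [pvDigitsRest?, if_neg hus, hvb, Option.bind_some]
  simp [pvDigits?, hva, h3]
  ring

-- proof-only: the byte list decoded from an (all-hex) char list, two digits a byte
def pvDecode : List Char → List Nat
  | [] => []
  | [_] => []
  | a :: b :: rest => (16 * (pvHexVal a).getD 0 + (pvHexVal b).getD 0) :: pvDecode rest

theorem pvFromhex_decode : ∀ (l : List Char), (∀ c ∈ l, pvIsHex c = true) →
    pvFromhex? (l.take (l.length / 2 * 2)) = some (pvDecode l) := by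
  intro l
  induction l using pvDecode.induct with
  | case1 => intro _; simp [pvFromhex?, pvDecode]
  | case2 a => intro _; simp [pvFromhex?, pvDecode]
  | case3 a b rest ih =>
    intro h
    have ha := h a (by simp)
    have hb := h b (by simp)
    obtain ⟨x, hva, _⟩ := pvHexVal_of_isHex ha
    obtain ⟨y, hvb, _⟩ := pvHexVal_of_isHex hb
    have htr : (a :: b :: rest).take ((a :: b :: rest).length / 2 * 2)
        = a :: b :: rest.take (rest.length / 2 * 2) := by
      have h2 : (rest.length + 1 + 1) / 2 * 2 = rest.length / 2 * 2 + 2 := by omega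
      simp [h2, List.take_succ_cons]
    rw [htr]
    simp only [pvFromhex?, pvWs_of_isHex ha, if_false, Bool.false_eq_true]
    rw [ih (fun c hc => h c (by simp [hc]))]
    simp [pvDecode, hva, hvb]

theorem pvLoopA_decode : ∀ (l : List Char), (∀ c ∈ l, pvIsHex c = true) → ∀ cal,
    pvLoopA l cal =
      some (cal ++ ((pvDecode l).filter (fun v => 32 ≤ v ∧ v ≤ 126)).map
        (fun v => Char.ofNat v)) := by
  intro l
  induction l using pvDecode.induct with
  | case1 => intro _ cal; simp [pvLoopA_nil, pvDecode]
  | case2 a =>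
    intro h cal
    have ha := h a (by simp)
    obtain ⟨x, hva, hle⟩ := pvHexVal_of_isHex ha
    have hnp : ¬(32 ≤ (x : Int) ∧ (x : Int) ≤ 126) := by
      omega
    rw [pvLoopA_one, pyIntBase16_one ha hva]
    simp only []
    rw [if_neg hnp]
    simp [pvDecode]
  | case3 a b rest ih =>
    intro h cal
    have ha := h a (by simp)
    have hb := h b (by simp)
    obtain ⟨x, hva, _⟩ := pvHexVal_of_isHex ha
    obtain ⟨y, hvb, _⟩ := pvHexVal_of_isHex hb
    have hcast : (16 * (x : Int) + (y : Int)).toNat = 16 * x + y := by omega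
    rw [pvLoopA_cons, pyIntBase16_two ha hb hva hvb]
    simp only []
    rw [ih (fun c hc => h c (by simp [hc]))]
    by_cases hpr : 32 ≤ 16 * x + y ∧ 16 * x + y ≤ 126
    · have h1 : (32 ≤ ((16 * x + y : Nat) : Int) ∧ ((16 * x + y : Nat) : Int) ≤ 126) := by
        push_cast; omega
      rw [if_pos h1]
      simp [pvDecode, hva, hvb, hpr, hcast]
    · have h1 : ¬(32 ≤ ((16 * x + y : Nat) : Int) ∧ ((16 * x + y : Nat) : Int) ≤ 126) := by
        push_cast; omega
      rw [if_neg h1]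
      simp [pvDecode, hva, hvb, hpr]

-- ===== VERDICT (by name: the statement is the Claim_ definition above) =====
theorem parse_calibration_id_spec : Claim_equal_parse_calibration_id := by
  intro resp _ hpre
  unfold Spec_parse_calibration_id
  match resp with
  | none => rfl
  | some s =>
    simp only [Pre_parse_calibration_id] at hpre
    by_cases hne : s.toList = []
    · simp [parse_calibration_id, parse_calibration_id_alt, hne]
    · simp only [parse_calibration_id, parse_calibration_id_alt, hne, if_false]
      set raw := s.toList.filter (fun c => !(c == ' ')) with hraw
      by_cases hpref : raw.take 4 = ['4', '9', '0', '4']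
      · simp only [hpref, if_true]
        have hall : ∀ c ∈ raw.drop 4, pvIsHex c = true := by
          simp only [hpref, decide_true, Bool.not_true, Bool.false_or,
            List.all_eq_true] at hpre
          exact hpre
        rw [pvLoopA_decode _ hall [], pvFromhex_decode _ hall]
        simp
      · simp [hpref]
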